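-- pv_equiv track=rewrite | github.com/PrajaktaPare/How-is-the-Josh- | DSA/strings/medium/beauty_of_substr.py | beauty_of_substr
-- ===== SOURCE A (Python) =====
-- def beauty_of_substr(s):
--     d={}
--     result=0
--     for i in range(len(s)):
--         if i not in d:
--             d[s[i]]=d.get(s[i],0)+1
--
--             values=d.values()
--             m=max(values)
--             mi=min(values)
--
--             result+=(m-mi)
--
--     return result
-- ===== SOURCE B (Python) =====
-- def beauty_of_substr(s):
--     cnt = {}          # char -> frequency in the prefix seen so far
--     fof = {}          # frequency -> how many distinct chars currently have it
--     mx = 0            # current max frequency (0 while prefix empty)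
--     mn = 0            # current min frequency
--     result = 0
--     for ch in s:
--         c = cnt.get(ch, 0)
--         cnt[ch] = c + 1
--         if c:
--             fof[c] -= 1
--         fof[c + 1] = fof.get(c + 1, 0) + 1
--         if mx < c + 1:
--             mx = c + 1
--         if c == 0:
--             mn = 1
--         elif c == mn and fof[c] == 0:
--             mn = c + 1
--         result += mx - mn
--     return result
-- ===== Notes on version B (the rewrite author's own statement) =====
-- stated objective: faster
-- what changed: Instead of recomputing max(d.values()) and min(d.values()) by a full scan of the distinct-character counts at every position, B maintains the current max and min frequencies incrementally with a counts-of-counts table, removing the inner scan.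
import Mathlib
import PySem

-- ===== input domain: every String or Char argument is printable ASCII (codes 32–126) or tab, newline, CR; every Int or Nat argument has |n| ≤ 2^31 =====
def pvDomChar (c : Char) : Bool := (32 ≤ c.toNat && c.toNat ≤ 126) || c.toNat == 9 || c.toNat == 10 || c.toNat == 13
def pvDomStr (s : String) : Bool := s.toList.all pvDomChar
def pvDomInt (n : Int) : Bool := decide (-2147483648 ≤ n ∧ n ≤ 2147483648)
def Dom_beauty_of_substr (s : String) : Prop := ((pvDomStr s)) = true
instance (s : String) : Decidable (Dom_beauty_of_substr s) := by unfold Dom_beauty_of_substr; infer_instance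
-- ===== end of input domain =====

-- B replaces A's per-character rescan of all distinct-character counts (max/min of d.values())
-- by incrementally maintained max/min frequencies with a counts-of-counts table (objective: faster).


-- ===== PORT A =====
-- A's loop body. Python's guard `if i not in d` compares the int index i with the character keys
-- of d, so in Python it is always True, and i is used only as s[i]: the loop is a fold over the
-- characters of s.
def pvStepA (st : PySem.Dict Char Int × Int) (c : Char) : PySem.Dict Char Int × Int :=
  let d := st.1.insert c (st.1.getD c 0 + 1)
  let values := d.values
  -- d is nonempty right after the insert, so Python's max/min never see an empty sequence
  let m := (PySem.List.max? values id).getD 0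
  let mi := (PySem.List.min? values id).getD 0
  (d, st.2 + (m - mi))

def beauty_of_substr (s : String) : Int :=
  (s.toList.foldl pvStepA (PySem.Dict.empty, 0)).2

-- ===== PORT B =====
-- B's loop body: cnt = char counts, fof = counts-of-counts, mx/mn = current extreme frequencies.
def pvStepB (st : PySem.Dict Char Int × PySem.Dict Int Int × Int × Int × Int) (ch : Char) :
    PySem.Dict Char Int × PySem.Dict Int Int × Int × Int × Int :=
  let cnt := st.1
  let fof := st.2.1
  let mx := st.2.2.1
  let mn := st.2.2.2.1
  let res := st.2.2.2.2
  let c := cnt.getD ch 0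
  let cnt' := cnt.insert ch (c + 1)
  -- Python `fof[c] -= 1`: whenever c ≠ 0 the key c is present (ch itself has count c)
  let fof1 := if c ≠ 0 then fof.insert c (fof.getD c 0 - 1) else fof
  let fof2 := fof1.insert (c + 1) (fof1.getD (c + 1) 0 + 1)
  let mx' := if mx < c + 1 then c + 1 else mx
  -- Python `elif c == mn and fof[c] == 0`: the key c is present here (just decremented)
  let mn' := if c = 0 then 1 else if c = mn ∧ fof2.getD c 0 = 0 then c + 1 else mn
  (cnt', fof2, mx', mn', res + (mx' - mn'))

def beauty_of_substr_alt (s : String) : Int :=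
  (s.toList.foldl pvStepB (PySem.Dict.empty, PySem.Dict.empty, 0, 0, 0)).2.2.2.2

-- ===== PRECONDITION & SPEC =====
def Spec_beauty_of_substr (s : String) (out : Int) : Prop := out = beauty_of_substr_alt s
instance (s : String) (out : Int) : Decidable (Spec_beauty_of_substr s out) := by unfold Spec_beauty_of_substr; infer_instance

-- ===== CLAIM (what is proved, stated in full; the proofs are below) =====
def Claim_equal_beauty_of_substr : Prop := ∀ (s : String), Dom_beauty_of_substr s → Spec_beauty_of_substr s (beauty_of_substr s)

-- ===== LEMMAS AND PROOFS =====

-- the count of character k in prefix l, as a Python int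
def pvCnt (l : List Char) (k : Char) : Int := (l.count k : Int)

-- the value list of the frequency dict after prefix l
def pvVals (l : List Char) : List Int := (PySem.Set.ofList l).map (fun k => pvCnt l k)

def pvMaxV (l : List Char) : Int := (PySem.List.max? (pvVals l) id).getD 0
def pvMinV (l : List Char) : Int := (PySem.List.min? (pvVals l) id).getD 0

-- number of distinct characters of l whose count is k (the meaning of B's fof dict)
def pvFofN (l : List Char) (k : Int) : Nat :=
  (PySem.Set.ofList l).countP (fun ch => decide (pvCnt l ch = k))

lemma pvCounter_append (l : List Char) (x : Char) :
    PySem.Dict.counter (l ++ [x])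
      = (PySem.Dict.counter l).insert x ((PySem.Dict.counter l).getD x 0 + 1) := by
  rw [← PySem.Dict.foldl_insert_getD_add_one_eq_counter,
      ← PySem.Dict.foldl_insert_getD_add_one_eq_counter, List.foldl_append]
  rfl

lemma pvValues_counter (l : List Char) : (PySem.Dict.counter l).values = pvVals l := by
  simp only [PySem.Dict.values]
  rw [PySem.Dict.items_counter]
  simp [pvVals, pvCnt, List.map_map, Function.comp]

lemma pvMem_vals {l : List Char} {w : Int} :
    w ∈ pvVals l ↔ ∃ k, k ∈ l ∧ pvCnt l k = w := by
  simp [pvVals, PySem.Set.mem_ofList]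

lemma pvCnt_append (l : List Char) (x k : Char) :
    pvCnt (l ++ [x]) k = pvCnt l k + (if k = x then 1 else 0) := by
  unfold pvCnt
  by_cases h : k = x
  · simp [List.count_append, h]
  · have h0 : List.count k [x] = 0 := List.count_eq_zero.mpr (by simp [h])
    simp [List.count_append, h, h0]

lemma pvCnt_append_self (l : List Char) (x : Char) :
    pvCnt (l ++ [x]) x = pvCnt l x + 1 := by
  rw [pvCnt_append]; simp

lemma pvCnt_append_ne (l : List Char) {x k : Char} (h : k ≠ x) :
    pvCnt (l ++ [x]) k = pvCnt l k := by
  rw [pvCnt_append]; simp [h]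

lemma pvCnt_mem_pos {l : List Char} {k : Char} (h : k ∈ l) : 1 ≤ pvCnt l k := by
  have := List.count_pos_iff.mpr h
  unfold pvCnt; omega

lemma pvCnt_not_mem {l : List Char} {k : Char} (h : k ∉ l) : pvCnt l k = 0 := by
  have := List.count_eq_zero.mpr h
  unfold pvCnt; omega

lemma pvVals_pos {l : List Char} : ∀ w ∈ pvVals l, 1 ≤ w := by
  intro w hw
  obtain ⟨k, hk, hc⟩ := pvMem_vals.mp hw
  exact hc ▸ pvCnt_mem_pos hk

lemma pvMaxV_ub {l : List Char} : ∀ w ∈ pvVals l, w ≤ pvMaxV l := by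
  intro w hw
  unfold pvMaxV
  cases h : PySem.List.max? (pvVals l) id with
  | none =>
      rw [(PySem.List.max?_eq_none_iff _ _).mp h] at hw
      simp at hw
  | some m => simpa using PySem.List.max?_isMax h w hw

lemma pvMinV_lb {l : List Char} : ∀ w ∈ pvVals l, pvMinV l ≤ w := by
  intro w hw
  unfold pvMinV
  cases h : PySem.List.min? (pvVals l) id with
  | none =>
      rw [(PySem.List.min?_eq_none_iff _ _).mp h] at hw
      simp at hw
  | some m => simpa using PySem.List.min?_isMin h w hw

lemma pvMaxV_mem {l : List Char} (h : pvVals l ≠ []) : pvMaxV l ∈ pvVals l := by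
  unfold pvMaxV
  cases hm : PySem.List.max? (pvVals l) id with
  | none => exact absurd ((PySem.List.max?_eq_none_iff _ _).mp hm) h
  | some m => simpa using PySem.List.max?_mem hm

lemma pvMinV_mem {l : List Char} (h : pvVals l ≠ []) : pvMinV l ∈ pvVals l := by
  unfold pvMinV
  cases hm : PySem.List.min? (pvVals l) id with
  | none => exact absurd ((PySem.List.min?_eq_none_iff _ _).mp hm) h
  | some m => simpa using PySem.List.min?_mem hm

lemma pvMaxV_eq {l : List Char} {m : Int} (h1 : m ∈ pvVals l)
    (h2 : ∀ w ∈ pvVals l, w ≤ m) : pvMaxV l = m := by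
  have hne : pvVals l ≠ [] := List.ne_nil_of_mem h1
  have hmem := pvMaxV_mem hne
  exact le_antisymm (h2 _ hmem) (pvMaxV_ub m h1)

lemma pvMinV_eq {l : List Char} {m : Int} (h1 : m ∈ pvVals l)
    (h2 : ∀ w ∈ pvVals l, m ≤ w) : pvMinV l = m := by
  have hne : pvVals l ≠ [] := List.ne_nil_of_mem h1
  have hmem := pvMinV_mem hne
  exact le_antisymm (pvMinV_lb m h1) (h2 _ hmem)

lemma pvOfList_append_mem {l : List Char} {x : Char} (h : x ∈ l) :
    PySem.Set.ofList (l ++ [x]) = PySem.Set.ofList l := by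
  rw [PySem.Set.ofList_append, PySem.Set.update_cons, PySem.Set.update_nil,
      PySem.Set.add_of_mem ((PySem.Set.mem_ofList l x).mpr h)]

lemma pvOfList_append_not_mem {l : List Char} {x : Char} (h : x ∉ l) :
    PySem.Set.ofList (l ++ [x]) = PySem.Set.ofList l ++ [x] := by
  rw [PySem.Set.ofList_append, PySem.Set.update_cons, PySem.Set.update_nil,
      PySem.Set.add_of_not_mem (fun hx => h ((PySem.Set.mem_ofList l x).mp hx))]

lemma pvFof_append_not_mem {l : List Char} {x : Char} (h : x ∉ l) (k : Int) :
    pvFofN (l ++ [x]) k = pvFofN l k + (if k = 1 then 1 else 0) := by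
  unfold pvFofN
  rw [pvOfList_append_not_mem h, List.countP_append]
  have h1 : (PySem.Set.ofList l).countP (fun ch => decide (pvCnt (l ++ [x]) ch = k))
      = (PySem.Set.ofList l).countP (fun ch => decide (pvCnt l ch = k)) := by
    apply List.countP_congr
    intro ch hch
    have hch' : ch ∈ l := (PySem.Set.mem_ofList l ch).mp hch
    have hne : ch ≠ x := fun he => h (he ▸ hch')
    rw [pvCnt_append_ne l hne]
  have h2 : pvCnt (l ++ [x]) x = 1 := by
    rw [pvCnt_append_self, pvCnt_not_mem h]; omega
  rw [h1]
  simp only [List.countP_cons, List.countP_nil, h2]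
  by_cases hk : k = 1 <;> simp [hk, eq_comm]

lemma pvFof_append_mem {l : List Char} {x : Char} (h : x ∈ l) (k : Int) :
    pvFofN (l ++ [x]) k + (if k = pvCnt l x then 1 else 0)
      = pvFofN l k + (if k = pvCnt l x + 1 then 1 else 0) := by
  have hnd : (PySem.Set.ofList l).Nodup := PySem.Set.nodup_ofList l
  have hxS : x ∈ PySem.Set.ofList l := (PySem.Set.mem_ofList l x).mpr h
  have hperm : (PySem.Set.ofList l).Perm (x :: (PySem.Set.ofList l).erase x) :=
    List.perm_cons_erase hxS
  unfold pvFofN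
  rw [pvOfList_append_mem h, hperm.countP_eq, hperm.countP_eq]
  simp only [List.countP_cons]
  have hT : (((PySem.Set.ofList l).erase x).countP (fun ch => decide (pvCnt (l ++ [x]) ch = k)))
      = (((PySem.Set.ofList l).erase x).countP (fun ch => decide (pvCnt l ch = k))) := by
    apply List.countP_congr
    intro ch hch
    have hne : ch ≠ x := (List.Nodup.mem_erase_iff hnd |>.mp hch).1
    rw [pvCnt_append_ne l hne]
  rw [hT, pvCnt_append_self]
  by_cases h1 : k = pvCnt l x <;> by_cases h2 : k = pvCnt l x + 1 <;>
    simp [h1, h2, eq_comm] <;> try omega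

lemma pvMax_step (l : List Char) (x : Char) :
    pvMaxV (l ++ [x]) = if pvMaxV l < pvCnt l x + 1 then pvCnt l x + 1 else pvMaxV l := by
  have hc0 : 0 ≤ pvCnt l x := by unfold pvCnt; positivity
  apply pvMaxV_eq
  · by_cases hlt : pvMaxV l < pvCnt l x + 1
    · simp only [hlt, if_true]
      exact pvMem_vals.mpr ⟨x, by simp, pvCnt_append_self l x⟩
    · simp only [hlt, if_false]
      have hm : pvMaxV l ∈ pvVals l := by
        apply pvMaxV_mem
        intro hnil
        have : pvMaxV l = 0 := by unfold pvMaxV; rw [hnil]; rfl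
        omega
      obtain ⟨kk, hkk, hck⟩ := pvMem_vals.mp hm
      have hkx : kk ≠ x := by
        rintro rfl
        omega
      exact pvMem_vals.mpr ⟨kk, by simp [hkk], by rw [pvCnt_append_ne l hkx, hck]⟩
  · intro w hw
    obtain ⟨kk, hkk, hck⟩ := pvMem_vals.mp hw
    by_cases hkx : kk = x
    · subst hkx
      rw [pvCnt_append_self] at hck
      split_ifs <;> omega
    · have hk' : kk ∈ l := by
        rcases List.mem_append.mp hkk with h' | h'
        · exact h'
        · simp at h'; exact absurd h' hkx
      rw [pvCnt_append_ne l hkx] at hck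
      have := pvMaxV_ub (pvCnt l kk) (pvMem_vals.mpr ⟨kk, hk', rfl⟩)
      split_ifs <;> omega

lemma pvMin_step_new {l : List Char} {x : Char} (h : x ∉ l) : pvMinV (l ++ [x]) = 1 := by
  apply pvMinV_eq
  · exact pvMem_vals.mpr ⟨x, by simp, by rw [pvCnt_append_self, pvCnt_not_mem h]; omega⟩
  · exact pvVals_pos

lemma pvMin_step_old {l : List Char} {x : Char} (h : x ∈ l) :
    pvMinV (l ++ [x]) = if pvCnt l x = pvMinV l ∧ (pvFofN (l ++ [x]) (pvCnt l x) : Int) = 0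
      then pvCnt l x + 1 else pvMinV l := by
  have hc1 : 1 ≤ pvCnt l x := pvCnt_mem_pos h
  have hcm : pvCnt l x ∈ pvVals l := pvMem_vals.mpr ⟨x, h, rfl⟩
  have hmnc : pvMinV l ≤ pvCnt l x := pvMinV_lb _ hcm
  have hmn_mem : pvMinV l ∈ pvVals l := pvMinV_mem (List.ne_nil_of_mem hcm)
  split_ifs with hcond
  · obtain ⟨hceq, hfof⟩ := hcond
    have hfofN : pvFofN (l ++ [x]) (pvCnt l x) = 0 := by exact_mod_cast hfof
    have hnone : ∀ ch ∈ PySem.Set.ofList (l ++ [x]),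
        ¬ (pvCnt (l ++ [x]) ch = pvCnt l x) := by
      intro ch hch hc
      have := List.countP_eq_zero.mp hfofN ch hch
      simp [hc] at this
    apply pvMinV_eq
    · exact pvMem_vals.mpr ⟨x, by simp, pvCnt_append_self l x⟩
    · intro w hw
      obtain ⟨kk, hkk, hck⟩ := pvMem_vals.mp hw
      by_cases hkx : kk = x
      · subst hkx; rw [pvCnt_append_self] at hck; omega
      · have hk' : kk ∈ l := by
          rcases List.mem_append.mp hkk with h' | h'
          · exact h'
          · simp at h'; exact absurd h' hkx
        rw [pvCnt_append_ne l hkx] at hck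
        have hlb : pvMinV l ≤ pvCnt l kk := pvMinV_lb _ (pvMem_vals.mpr ⟨kk, hk', rfl⟩)
        have hneq : pvCnt (l ++ [x]) kk ≠ pvCnt l x :=
          hnone kk ((PySem.Set.mem_ofList _ _).mpr hkk)
        rw [pvCnt_append_ne l hkx] at hneq
        omega
  · apply pvMinV_eq
    · by_cases hceq : pvCnt l x = pvMinV l
      · have hfof : (pvFofN (l ++ [x]) (pvCnt l x) : Int) ≠ 0 := fun he => hcond ⟨hceq, he⟩
        have hfofN : pvFofN (l ++ [x]) (pvCnt l x) ≠ 0 := by exact_mod_cast hfof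
        have hex : ∃ ch ∈ PySem.Set.ofList (l ++ [x]),
            decide (pvCnt (l ++ [x]) ch = pvCnt l x) = true := by
          by_contra hno
          push Not at hno
          have : pvFofN (l ++ [x]) (pvCnt l x) = 0 := by
            unfold pvFofN
            exact List.countP_eq_zero.mpr (by intro a ha; simp [hno a ha])
          exact hfofN this
        obtain ⟨ch, hch, hp⟩ := hex
        have hch' : ch ∈ l ++ [x] := (PySem.Set.mem_ofList _ _).mp hch
        have : pvCnt (l ++ [x]) ch = pvCnt l x := by simpa using hp
        exact pvMem_vals.mpr ⟨ch, hch', by rw [this, hceq]⟩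
      · have hlt : pvMinV l < pvCnt l x := lt_of_le_of_ne hmnc (fun he => hceq he.symm)
        obtain ⟨kk, hkk, hck⟩ := pvMem_vals.mp hmn_mem
        have hkx : kk ≠ x := by rintro rfl; omega
        exact pvMem_vals.mpr ⟨kk, by simp [hkk], by rw [pvCnt_append_ne l hkx, hck]⟩
    · intro w hw
      obtain ⟨kk, hkk, hck⟩ := pvMem_vals.mp hw
      by_cases hkx : kk = x
      · subst hkx; rw [pvCnt_append_self] at hck; omega
      · have hk' : kk ∈ l := by
          rcases List.mem_append.mp hkk with h' | h'
          · exact h'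
          · simp at h'; exact absurd h' hkx
        rw [pvCnt_append_ne l hkx] at hck
        have := pvMinV_lb (pvCnt l kk) (pvMem_vals.mpr ⟨kk, hk', rfl⟩)
        omega

-- one step of A, on the characterized state
lemma pvStepA_char (l : List Char) (x : Char) (r : Int) :
    pvStepA (PySem.Dict.counter l, r) x
      = (PySem.Dict.counter (l ++ [x]), r + (pvMaxV (l ++ [x]) - pvMinV (l ++ [x]))) := by
  show ((PySem.Dict.counter l).insert x ((PySem.Dict.counter l).getD x 0 + 1),
      r + (((PySem.List.max? ((PySem.Dict.counter l).insert x ((PySem.Dict.counter l).getD x 0 + 1)).values id).getD 0)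
        - ((PySem.List.min? ((PySem.Dict.counter l).insert x ((PySem.Dict.counter l).getD x 0 + 1)).values id).getD 0))) = _
  rw [← pvCounter_append, pvValues_counter]
  rfl

-- one step of B, on the characterized state
lemma pvStepB_char (l : List Char) (x : Char) (fofd : PySem.Dict Int Int) (res : Int)
    (hfof : ∀ k : Int, k ≠ 0 → fofd.getD k 0 = (pvFofN l k : Int)) :
    (pvStepB (PySem.Dict.counter l, fofd, pvMaxV l, pvMinV l, res) x).1 = PySem.Dict.counter (l ++ [x]) ∧
    (∀ k : Int, k ≠ 0 →
      (pvStepB (PySem.Dict.counter l, fofd, pvMaxV l, pvMinV l, res) x).2.1.getD k 0 = (pvFofN (l ++ [x]) k : Int)) ∧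
    (pvStepB (PySem.Dict.counter l, fofd, pvMaxV l, pvMinV l, res) x).2.2.1 = pvMaxV (l ++ [x]) ∧
    (pvStepB (PySem.Dict.counter l, fofd, pvMaxV l, pvMinV l, res) x).2.2.2.1 = pvMinV (l ++ [x]) ∧
    (pvStepB (PySem.Dict.counter l, fofd, pvMaxV l, pvMinV l, res) x).2.2.2.2
      = res + (pvMaxV (l ++ [x]) - pvMinV (l ++ [x])) := by
  have hc : (PySem.Dict.counter l).getD x 0 = pvCnt l x := PySem.Dict.getD_counter l x
  have e1 : (pvStepB (PySem.Dict.counter l, fofd, pvMaxV l, pvMinV l, res) x).1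
      = (PySem.Dict.counter l).insert x ((PySem.Dict.counter l).getD x 0 + 1) := rfl
  have hfof2 : ∀ k : Int, k ≠ 0 →
      (pvStepB (PySem.Dict.counter l, fofd, pvMaxV l, pvMinV l, res) x).2.1.getD k 0
        = (pvFofN (l ++ [x]) k : Int) := by
    intro k hk
    have e2 : (pvStepB (PySem.Dict.counter l, fofd, pvMaxV l, pvMinV l, res) x).2.1
        = (if pvCnt l x ≠ 0 then fofd.insert (pvCnt l x) (fofd.getD (pvCnt l x) 0 - 1) else fofd).insert
            (pvCnt l x + 1)
            ((if pvCnt l x ≠ 0 then fofd.insert (pvCnt l x) (fofd.getD (pvCnt l x) 0 - 1) else fofd).getD (pvCnt l x + 1) 0 + 1) := by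
      show (if (PySem.Dict.counter l).getD x 0 ≠ 0 then _ else fofd).insert _ _ = _
      rw [hc]
    rw [e2]
    by_cases hxl : x ∈ l
    · have hc1 : 1 ≤ pvCnt l x := pvCnt_mem_pos hxl
      have hcne : pvCnt l x ≠ 0 := by omega
      rw [if_pos hcne]
      simp only [PySem.Dict.getD_insert]
      rw [if_neg (show ¬ (pvCnt l x + 1 = pvCnt l x) by omega)]
      by_cases h1 : k = pvCnt l x + 1
      · subst h1
        rw [if_pos rfl, hfof _ (by omega)]
        have keyZ := congrArg (fun n : Nat => (n : Int)) (pvFof_append_mem hxl (pvCnt l x + 1))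
        push_cast at keyZ
        rw [if_neg (show ¬ (pvCnt l x + 1 = pvCnt l x) by omega), if_pos rfl] at keyZ
        omega
      · rw [if_neg h1]
        by_cases h2 : k = pvCnt l x
        · subst h2
          rw [if_pos rfl, hfof _ (by omega)]
          have keyZ := congrArg (fun n : Nat => (n : Int)) (pvFof_append_mem hxl (pvCnt l x))
          push_cast at keyZ
          rw [if_pos rfl, if_neg (show ¬ (pvCnt l x = pvCnt l x + 1) by omega)] at keyZ
          omega
        · rw [if_neg h2, hfof _ hk]
          have keyZ := congrArg (fun n : Nat => (n : Int)) (pvFof_append_mem hxl k)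
          push_cast at keyZ
          rw [if_neg h2, if_neg h1] at keyZ
          omega
    · have hc0 : pvCnt l x = 0 := pvCnt_not_mem hxl
      rw [hc0]
      rw [if_neg (by simp)]
      rw [PySem.Dict.getD_insert]
      have key := pvFof_append_not_mem hxl k
      norm_num
      by_cases h1 : k = 1
      · subst h1
        rw [if_pos rfl, hfof 1 (by omega), key]
        push_cast
        simp
      · rw [if_neg h1, hfof k hk, key, if_neg h1]
        simp
  have hmx2 : (pvStepB (PySem.Dict.counter l, fofd, pvMaxV l, pvMinV l, res) x).2.2.1
      = pvMaxV (l ++ [x]) := by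
    have e3 : (pvStepB (PySem.Dict.counter l, fofd, pvMaxV l, pvMinV l, res) x).2.2.1
        = (if pvMaxV l < (PySem.Dict.counter l).getD x 0 + 1 then (PySem.Dict.counter l).getD x 0 + 1 else pvMaxV l) := rfl
    rw [e3, hc, ← pvMax_step]
  have hmn2 : (pvStepB (PySem.Dict.counter l, fofd, pvMaxV l, pvMinV l, res) x).2.2.2.1
      = pvMinV (l ++ [x]) := by
    have e4 : (pvStepB (PySem.Dict.counter l, fofd, pvMaxV l, pvMinV l, res) x).2.2.2.1
        = (if (PySem.Dict.counter l).getD x 0 = 0 then 1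
           else if (PySem.Dict.counter l).getD x 0 = pvMinV l ∧
              (pvStepB (PySem.Dict.counter l, fofd, pvMaxV l, pvMinV l, res) x).2.1.getD ((PySem.Dict.counter l).getD x 0) 0 = 0
           then (PySem.Dict.counter l).getD x 0 + 1 else pvMinV l) := rfl
    rw [e4, hc]
    by_cases hxl : x ∈ l
    · have hc1 : 1 ≤ pvCnt l x := pvCnt_mem_pos hxl
      rw [if_neg (by omega), hfof2 (pvCnt l x) (by omega), ← pvMin_step_old hxl]
    · rw [pvCnt_not_mem hxl, if_pos rfl, (pvMin_step_new hxl).symm]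
  refine ⟨?_, hfof2, hmx2, hmn2, ?_⟩
  · rw [e1, ← pvCounter_append]
  · have e5 : (pvStepB (PySem.Dict.counter l, fofd, pvMaxV l, pvMinV l, res) x).2.2.2.2
        = res + ((pvStepB (PySem.Dict.counter l, fofd, pvMaxV l, pvMinV l, res) x).2.2.1
            - (pvStepB (PySem.Dict.counter l, fofd, pvMaxV l, pvMinV l, res) x).2.2.2.1) := rfl
    rw [e5, hmx2, hmn2]

-- the loop invariant: the fold states of both ports after any prefix l
def pvInv (l : List Char) : Prop :=
  (l.foldl pvStepA (PySem.Dict.empty, 0)).1 = PySem.Dict.counter l ∧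
  (l.foldl pvStepB (PySem.Dict.empty, PySem.Dict.empty, 0, 0, 0)).1 = PySem.Dict.counter l ∧
  (l.foldl pvStepB (PySem.Dict.empty, PySem.Dict.empty, 0, 0, 0)).2.2.1 = pvMaxV l ∧
  (l.foldl pvStepB (PySem.Dict.empty, PySem.Dict.empty, 0, 0, 0)).2.2.2.1 = pvMinV l ∧
  (∀ k : Int, k ≠ 0 →
    (l.foldl pvStepB (PySem.Dict.empty, PySem.Dict.empty, 0, 0, 0)).2.1.getD k 0 = (pvFofN l k : Int)) ∧
  (l.foldl pvStepA (PySem.Dict.empty, 0)).2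
    = (l.foldl pvStepB (PySem.Dict.empty, PySem.Dict.empty, 0, 0, 0)).2.2.2.2

lemma pvInv_all (l : List Char) : pvInv l := by
  induction l using List.reverseRecOn with
  | nil =>
      refine ⟨rfl, rfl, rfl, rfl, ?_, rfl⟩
      intro k hk
      simp [pvFofN, PySem.Dict.getD_empty, PySem.Set.ofList]
  | append_singleton l x ih =>
      obtain ⟨ha, hb, hmx, hmn, hfof, hres⟩ := ih
      have hApair : l.foldl pvStepA (PySem.Dict.empty, 0)
          = (PySem.Dict.counter l, (l.foldl pvStepA (PySem.Dict.empty, 0)).2) :=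
        Prod.ext ha rfl
      have hBpair : l.foldl pvStepB (PySem.Dict.empty, PySem.Dict.empty, 0, 0, 0)
          = (PySem.Dict.counter l,
             (l.foldl pvStepB (PySem.Dict.empty, PySem.Dict.empty, 0, 0, 0)).2.1,
             pvMaxV l, pvMinV l,
             (l.foldl pvStepB (PySem.Dict.empty, PySem.Dict.empty, 0, 0, 0)).2.2.2.2) :=
        Prod.ext hb (Prod.ext rfl (Prod.ext hmx (Prod.ext hmn rfl)))
      obtain ⟨c1, c2, c3, c4, c5⟩ :=
        pvStepB_char l x (l.foldl pvStepB (PySem.Dict.empty, PySem.Dict.empty, 0, 0, 0)).2.1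
          (l.foldl pvStepB (PySem.Dict.empty, PySem.Dict.empty, 0, 0, 0)).2.2.2.2 hfof
      refine ⟨?_, ?_, ?_, ?_, ?_, ?_⟩ <;>
        simp only [List.foldl_append, List.foldl_cons, List.foldl_nil]
      · rw [hApair, pvStepA_char]
      · rw [hBpair]; exact c1
      · rw [hBpair]; exact c3
      · rw [hBpair]; exact c4
      · intro k hk; rw [hBpair]; exact c2 k hk
      · rw [hApair, pvStepA_char, hBpair, c5, hres]

-- ===== VERDICT (by name: the statement is the Claim_ definition above) =====
theorem beauty_of_substr_spec : Claim_equal_beauty_of_substr := by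
  intro s _
  unfold Spec_beauty_of_substr beauty_of_substr beauty_of_substr_alt
  exact (pvInv_all s.toList).2.2.2.2.2
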